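-- pv_equiv track=rewrite | github.com/Bushwallyta271828/Past-Projects | Schedule Management Code/checking/day_check.py | out_of_order
-- ===== SOURCE A (Python) =====
-- def out_of_order(lines):
--     """
--     This function takes the real_lines of
--     a raw day and examines that day for
--     errors in the form of initial commands that are logically
--     out of order. For instance, all of the sequences:
--     * start stop start stop
--     * start sub stop add start stop
--     * add add start sub stop
--     are in order (would return "" as the error messages), while
--     all of:
--     * stop start stop start
--     * start stop stop
--     * start start stop
--     * start sub stop add stop
--     * start add stop sub start add stop
--     are out of order (would return appropriate error messages).
--     This function assumes that other_syntax has been passed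
--     without errors.
--     """
--     commands = []
--     for line in lines:
--         first_statement = line.split()[0]
--         if first_statement in ["start", "stop"]:
--             commands.append(first_statement)
--         elif first_statement == "-":
--             commands.append("sub")
--         elif first_statement == "+":
--             commands.append("add")
--     in_clause = False
--     report = ""
--     for commandnum, command in enumerate(commands):
--         if in_clause == False and command == "start":
--             in_clause = True
--         elif in_clause == True and command == "stop":
--             in_clause = False
--         elif in_clause == False and command == "stop":
--             report += "line " + str(commandnum) + ": stop while not in clause\n"
--         elif in_clause == True and command == "start":
--             report += "line " + str(commandnum) + ": start while already in clause\n"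
--         elif in_clause == False and command == "sub":
--             report += "line " + str(commandnum) + ": sub while not in clause\n"
--         elif in_clause == True and command == "add":
--             report += "line " + str(commandnum) + ": add while already in clause\n"
--     if in_clause:
--         report += "ending in clause\n"
--     if report != "":
--         report = "out_of_order:\n" + report
--     return report
-- ===== SOURCE B (Python) =====
-- NAMES = {"start": "start", "stop": "stop", "-": "sub", "+": "add"}
-- BAD = {("start", True): "start while already in clause",
--        ("stop", False): "stop while not in clause",
--        ("sub", False): "sub while not in clause",
--        ("add", True): "add while already in clause"}
--
-- def out_of_order(lines):
--     cmds = [NAMES[w] for w in (line.split()[0] for line in lines) if w in NAMES]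
--
--     def inside(i):
--         # in_clause just before command i equals "the nearest earlier start/stop
--         # marker is a start"; this is correct because erroneous commands never
--         # change the clause state, only start/stop markers do.
--         for p in reversed(cmds[:i]):
--             if p == "start":
--                 return True
--             if p == "stop":
--                 return False
--         return False
--
--     msgs = ["line " + str(i) + ": " + BAD[(c, inside(i))]
--             for i, c in enumerate(cmds) if (c, inside(i)) in BAD]
--     if inside(len(cmds)):
--         msgs.append("ending in clause")
--     if not msgs:
--         return ""
--     return "out_of_order:\n" + "".join(m + "\n" for m in msgs)
-- ===== Notes on version B (the rewrite author's own statement) =====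
-- stated objective: alternative
-- what changed: B drops A's sequential mutable state machine entirely: it judges each recognised command statelessly by a backward search for the nearest earlier start/stop marker (in_clause iff that marker is a start, correct because erroneous commands never change the state), building the messages as a comprehension and joining them at the end.
-- outside the precondition, e.g. on out_of_order(['start', '']): A raises IndexError, B raises IndexError
import Mathlib
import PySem

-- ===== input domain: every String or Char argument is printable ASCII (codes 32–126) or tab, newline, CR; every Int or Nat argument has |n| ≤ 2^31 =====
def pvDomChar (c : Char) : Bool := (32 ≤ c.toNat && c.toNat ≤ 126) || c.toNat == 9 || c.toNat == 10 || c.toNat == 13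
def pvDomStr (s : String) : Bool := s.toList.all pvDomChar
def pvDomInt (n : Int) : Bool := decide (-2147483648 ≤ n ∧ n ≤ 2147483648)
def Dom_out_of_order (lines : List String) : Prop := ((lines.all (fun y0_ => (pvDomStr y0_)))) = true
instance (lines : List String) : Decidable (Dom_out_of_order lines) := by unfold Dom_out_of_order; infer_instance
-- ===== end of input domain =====

-- B replaces A's sequential mutable state machine by a stateless rule: each
-- command is judged by a backward search for the nearest earlier start/stop
-- marker (objective: alternative; B is O(n^2) worst case, not faster).

-- ===== PORT A =====
-- A: first pass builds the list of recognised commands, second pass runs the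
-- state machine over enumerate(commands) accumulating the report string.
-- (line.split()[0] raises IndexError in Python when the split is empty — those
-- inputs are excluded by Pre_out_of_order; the `.getD ""` is only for totality.)
def out_of_order (lines : List String) : String :=
  let commands := lines.foldl (fun cs line =>
    if (PySem.List.pyGet? (PySem.Str.split₀ line) 0).getD "" == "start"
       || (PySem.List.pyGet? (PySem.Str.split₀ line) 0).getD "" == "stop" then
      cs ++ [(PySem.List.pyGet? (PySem.Str.split₀ line) 0).getD ""]
    else if (PySem.List.pyGet? (PySem.Str.split₀ line) 0).getD "" == "-" then cs ++ ["sub"]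
    else if (PySem.List.pyGet? (PySem.Str.split₀ line) 0).getD "" == "+" then cs ++ ["add"]
    else cs) ([] : List String)
  let st := (PySem.List.enumerate commands 0).foldl (fun (st : Bool × String) p =>
    if !st.1 && p.2 == "start" then (true, st.2)
    else if st.1 && p.2 == "stop" then (false, st.2)
    else if !st.1 && p.2 == "stop" then
      (st.1, st.2 ++ ("line " ++ PySem.Int.toStr p.1 ++ ": stop while not in clause" ++ "\n"))
    else if st.1 && p.2 == "start" then
      (st.1, st.2 ++ ("line " ++ PySem.Int.toStr p.1 ++ ": start while already in clause" ++ "\n"))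
    else if !st.1 && p.2 == "sub" then
      (st.1, st.2 ++ ("line " ++ PySem.Int.toStr p.1 ++ ": sub while not in clause" ++ "\n"))
    else if st.1 && p.2 == "add" then
      (st.1, st.2 ++ ("line " ++ PySem.Int.toStr p.1 ++ ": add while already in clause" ++ "\n"))
    else st) (false, "")
  let report := if st.1 then st.2 ++ "ending in clause" ++ "\n" else st.2
  if report ≠ "" then "out_of_order:\n" ++ report else report

-- ===== PORT B =====
-- NAMES dict lookup of Source B (first-match chain on the four keys)
def bName? (w : String) : Option String :=
  if w == "start" then some "start"
  else if w == "stop" then some "stop"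
  else if w == "-" then some "sub"
  else if w == "+" then some "add"
  else none

-- Source B's `inside`: scan reversed(cmds[:i]) for the nearest start/stop marker
def bInside : List String → Bool
  | [] => false
  | p :: rest => if p == "start" then true else if p == "stop" then false else bInside rest

-- BAD dict lookup of Source B, keyed on (command, inside)
def bBad? (c : String) (ins : Bool) : Option String :=
  if c == "start" && ins then some "start while already in clause"
  else if c == "stop" && !ins then some "stop while not in clause"
  else if c == "sub" && !ins then some "sub while not in clause"
  else if c == "add" && ins then some "add while already in clause"
  else none

-- B: comprehension builds cmds; each command is judged statelessly by a
-- backward search for the nearest earlier start/stop marker; messages joined.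
def out_of_order_alt (lines : List String) : String :=
  let cmds := lines.filterMap (fun line =>
    bName? ((PySem.List.pyGet? (PySem.Str.split₀ line) 0).getD ""))
  let msgs := (cmds.zipIdx).filterMap (fun p =>
    (bBad? p.1 (bInside ((cmds.take p.2).reverse))).map
      (fun m => "line " ++ PySem.Int.toStr (p.2 : Int) ++ ": " ++ m))
  let msgs := if bInside cmds.reverse then msgs ++ ["ending in clause"] else msgs
  if msgs.isEmpty then ""
  else "out_of_order:\n" ++ String.join (msgs.map (fun m => m ++ "\n"))

-- ===== PRECONDITION & SPEC =====
-- Pre_ excludes inputs containing a line that is empty or whitespace-only: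
-- there Python A raises IndexError on line.split()[0] (and B raises identically).
def Pre_out_of_order (lines : List String) : Prop :=
  ∀ line ∈ lines, PySem.Str.split₀ line ≠ []
instance (lines : List String) : Decidable (Pre_out_of_order lines) := by
  unfold Pre_out_of_order; infer_instance
def pvWitness_out_of_order : List String := ["start day", "+ 5", "stop"]

def Spec_out_of_order (lines : List String) (out : String) : Prop := out = out_of_order_alt lines
instance (lines : List String) (out : String) : Decidable (Spec_out_of_order lines out) := by unfold Spec_out_of_order; infer_instance

-- ===== CLAIM (what is proved, stated in full; the proofs are below) =====
def Claim_equal_out_of_order : Prop := ∀ (lines : List String), Dom_out_of_order lines → Pre_out_of_order lines → Spec_out_of_order lines (out_of_order lines)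

-- ===== LEMMAS AND PROOFS =====

-- the list of recognised commands (A's first pass, accumulator-free)
def pvExtract : List String → List String
  | [] => []
  | l :: ls =>
    if (PySem.List.pyGet? (PySem.Str.split₀ l) 0).getD "" == "start"
       || (PySem.List.pyGet? (PySem.Str.split₀ l) 0).getD "" == "stop" then
      (PySem.List.pyGet? (PySem.Str.split₀ l) 0).getD "" :: pvExtract ls
    else if (PySem.List.pyGet? (PySem.Str.split₀ l) 0).getD "" == "-" then "sub" :: pvExtract ls
    else if (PySem.List.pyGet? (PySem.Str.split₀ l) 0).getD "" == "+" then "add" :: pvExtract ls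
    else pvExtract ls

-- reference state machine: final in_clause flag and the messages (without '\n')
def pvRef : List String → Bool → Int → Bool × List String
  | [], b, _ => (b, [])
  | c :: cs, b, n =>
    if !b && c == "start" then pvRef cs true (n + 1)
    else if b && c == "stop" then pvRef cs false (n + 1)
    else if !b && c == "stop" then
      ((pvRef cs b (n + 1)).1, ("line " ++ PySem.Int.toStr n ++ ": stop while not in clause") :: (pvRef cs b (n + 1)).2)
    else if b && c == "start" then
      ((pvRef cs b (n + 1)).1, ("line " ++ PySem.Int.toStr n ++ ": start while already in clause") :: (pvRef cs b (n + 1)).2)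
    else if !b && c == "sub" then
      ((pvRef cs b (n + 1)).1, ("line " ++ PySem.Int.toStr n ++ ": sub while not in clause") :: (pvRef cs b (n + 1)).2)
    else if b && c == "add" then
      ((pvRef cs b (n + 1)).1, ("line " ++ PySem.Int.toStr n ++ ": add while already in clause") :: (pvRef cs b (n + 1)).2)
    else pvRef cs b (n + 1)

def pvRender : List String → String
  | [] => ""
  | m :: ms => (m ++ "\n") ++ pvRender ms

-- A's first pass builds pvExtract
theorem pvA1 (lines : List String) (cs : List String) :
    lines.foldl (fun cs line =>
      if (PySem.List.pyGet? (PySem.Str.split₀ line) 0).getD "" == "start"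
         || (PySem.List.pyGet? (PySem.Str.split₀ line) 0).getD "" == "stop" then
        cs ++ [(PySem.List.pyGet? (PySem.Str.split₀ line) 0).getD ""]
      else if (PySem.List.pyGet? (PySem.Str.split₀ line) 0).getD "" == "-" then cs ++ ["sub"]
      else if (PySem.List.pyGet? (PySem.Str.split₀ line) 0).getD "" == "+" then cs ++ ["add"]
      else cs) cs = cs ++ pvExtract lines := by
  induction lines generalizing cs with
  | nil => simp [pvExtract]
  | cons l ls ih =>
    simp only [List.foldl_cons]
    simp at ih
    by_cases h1 : ((PySem.List.pyGet? (PySem.Str.split₀ l) 0).getD "" = "start")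
    · simp [pvExtract, h1, ih]
    · by_cases h2 : ((PySem.List.pyGet? (PySem.Str.split₀ l) 0).getD "" = "stop")
      · simp [pvExtract, h2, ih]
      · by_cases h3 : ((PySem.List.pyGet? (PySem.Str.split₀ l) 0).getD "" = "-")
        · simp [pvExtract, h3, ih]
        · by_cases h4 : ((PySem.List.pyGet? (PySem.Str.split₀ l) 0).getD "" = "+")
          · simp [pvExtract, h4, ih]
          · simp [pvExtract, h1, h2, h3, h4, ih]

-- A's second pass equals the reference machine
theorem pvA2 (cmds : List String) (b : Bool) (n : Int) (r : String) :
    (PySem.List.enumerate cmds n).foldl (fun (st : Bool × String) p =>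
      if !st.1 && p.2 == "start" then (true, st.2)
      else if st.1 && p.2 == "stop" then (false, st.2)
      else if !st.1 && p.2 == "stop" then
        (st.1, st.2 ++ ("line " ++ PySem.Int.toStr p.1 ++ ": stop while not in clause" ++ "\n"))
      else if st.1 && p.2 == "start" then
        (st.1, st.2 ++ ("line " ++ PySem.Int.toStr p.1 ++ ": start while already in clause" ++ "\n"))
      else if !st.1 && p.2 == "sub" then
        (st.1, st.2 ++ ("line " ++ PySem.Int.toStr p.1 ++ ": sub while not in clause" ++ "\n"))
      else if st.1 && p.2 == "add" then
        (st.1, st.2 ++ ("line " ++ PySem.Int.toStr p.1 ++ ": add while already in clause" ++ "\n"))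
      else st) (b, r)
    = ((pvRef cmds b n).1, r ++ pvRender (pvRef cmds b n).2) := by
  induction cmds generalizing b n r with
  | nil => simp [pvRef, pvRender]
  | cons c cs ih =>
    rw [PySem.List.enumerate_cons]
    simp only [List.foldl_cons]
    simp [String.append_assoc] at ih
    by_cases h1 : c = "start"
    · subst h1; cases b <;> simp [pvRef, ih, pvRender, String.append_assoc]
    · by_cases h2 : c = "stop"
      · subst h2; cases b <;> simp [pvRef, ih, pvRender, String.append_assoc]
      · by_cases h3 : c = "sub"
        · subst h3; cases b <;> simp [pvRef, ih, pvRender, String.append_assoc]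
        · by_cases h4 : c = "add"
          · subst h4; cases b <;> simp [pvRef, ih, pvRender, String.append_assoc]
          · cases b <;> simp [pvRef, h1, h2, h3, h4, String.append_assoc, ih]

-- cmds as computed by B's comprehension equals A's pvExtract
theorem pvCmdsEq (lines : List String) :
    lines.filterMap (fun line =>
      bName? ((PySem.List.pyGet? (PySem.Str.split₀ line) 0).getD "")) = pvExtract lines := by
  induction lines with
  | nil => simp [pvExtract]
  | cons l ls ih =>
    simp only [List.filterMap_cons]
    simp only [bName?, beq_iff_eq] at ih
    by_cases h1 : ((PySem.List.pyGet? (PySem.Str.split₀ l) 0).getD "" = "start")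
    · simp [pvExtract, bName?, h1, ih]
    · by_cases h2 : ((PySem.List.pyGet? (PySem.Str.split₀ l) 0).getD "" = "stop")
      · simp [pvExtract, bName?, h2, ih]
      · by_cases h3 : ((PySem.List.pyGet? (PySem.Str.split₀ l) 0).getD "" = "-")
        · simp [pvExtract, bName?, h3, ih]
        · by_cases h4 : ((PySem.List.pyGet? (PySem.Str.split₀ l) 0).getD "" = "+")
          · simp [pvExtract, bName?, h4, ih]
          · simp [pvExtract, bName?, h1, h2, h3, h4, ih]

-- reference rendering of B's stateless rule: messages for cs with context pre
def bMsgs : List String → List String → Nat → List String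
  | _, [], _ => []
  | pre, c :: rest, n =>
    (match bBad? c (bInside pre.reverse) with
     | some m => ["line " ++ PySem.Int.toStr (n : Int) ++ ": " ++ m]
     | none => []) ++ bMsgs (pre ++ [c]) rest (n + 1)

-- KEY: the state machine's state before a command equals "nearest earlier
-- start/stop marker is a start", and both produce the same messages.
theorem pvKey (cs : List String) : ∀ (pre : List String) (n : Nat),
    pvRef cs (bInside pre.reverse) (n : Int)
      = (bInside (pre ++ cs).reverse, bMsgs pre cs n) := by
  induction cs with
  | nil => intro pre n; simp [pvRef, bMsgs]
  | cons c rest ih =>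
    intro pre n
    have hrev : (pre ++ c :: rest).reverse = rest.reverse ++ c :: pre.reverse := by simp
    have hrec := ih (pre ++ [c]) (n + 1)
    simp only [List.append_assoc, List.singleton_append] at hrec
    rw [hrev] at hrec
    push_cast at hrec
    simp only [List.reverse_append, List.reverse_cons, List.reverse_nil, List.nil_append,
      List.singleton_append] at hrec
    rw [hrev]
    by_cases h1 : c = "start"
    · subst h1
      simp only [bInside, beq_self_eq_true, if_true] at hrec
      cases hb : bInside pre.reverse with
      | false => simp [pvRef, bMsgs, bBad?, hb, hrec]
      | true => simp [pvRef, bMsgs, bBad?, hb, hrec, String.append_assoc]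
    · by_cases h2 : c = "stop"
      · subst h2
        rw [show bInside ("stop" :: pre.reverse) = false from by simp [bInside]] at hrec
        cases hb : bInside pre.reverse with
        | false => simp [pvRef, bMsgs, bBad?, hb, hrec, String.append_assoc]
        | true => simp [pvRef, bMsgs, bBad?, hb, hrec]
      · have hins : bInside (c :: pre.reverse) = bInside pre.reverse := by
          simp [bInside, h1, h2]
        rw [hins] at hrec
        cases hb : bInside pre.reverse with
        | false =>
          rw [hb] at hrec
          by_cases h3 : c = "sub"
          · simp [pvRef, bMsgs, bBad?, h3, hb, hrec, String.append_assoc]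
          · by_cases h4 : c = "add"
            · simp [pvRef, bMsgs, bBad?, h4, hb, hrec]
            · simp [pvRef, bMsgs, bBad?, h1, h2, h3, hb, hrec]
        | true =>
          rw [hb] at hrec
          by_cases h3 : c = "sub"
          · simp [pvRef, bMsgs, bBad?, h3, hb, hrec]
          · by_cases h4 : c = "add"
            · simp [pvRef, bMsgs, bBad?, h4, hb, hrec, String.append_assoc]
            · simp [pvRef, bMsgs, bBad?, h1, h2, h4, hb, hrec]

-- B's zipIdx/filterMap comprehension computes bMsgs
theorem pvB1 (all : List String) : ∀ (cs pre : List String), all = pre ++ cs →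
    (cs.zipIdx pre.length).filterMap (fun p =>
      (bBad? p.1 (bInside ((all.take p.2).reverse))).map
        (fun m => "line " ++ PySem.Int.toStr (p.2 : Int) ++ ": " ++ m))
    = bMsgs pre cs pre.length := by
  intro cs
  induction cs with
  | nil => intro pre _; simp [bMsgs]
  | cons c rest ih =>
    intro pre hall
    rw [List.zipIdx_cons, List.filterMap_cons]
    have htake : all.take pre.length = pre := by rw [hall]; exact List.take_left
    have ihx := ih (pre ++ [c]) (by simp [hall])
    have hlen : (pre ++ [c]).length = pre.length + 1 := by simp
    rw [hlen] at ihx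
    rw [ihx]
    cases hB : bBad? c (bInside pre.reverse) with
    | none => simp [bMsgs, htake, hB]
    | some m => simp [bMsgs, htake, hB]

-- join of Source B equals pvRender
theorem pvFoldStr (l : List String) (a : String) :
    l.foldl (fun r s => r ++ s) a = a ++ l.foldl (fun r s => r ++ s) "" := by
  induction l generalizing a with
  | nil => simp
  | cons s l ih =>
    simp only [List.foldl_cons]
    rw [ih (a ++ s), ih ("" ++ s)]
    simp [String.append_assoc]

theorem pvJoin (ms : List String) :
    String.join (ms.map (fun m => m ++ "\n")) = pvRender ms := by
  induction ms with
  | nil => simp [pvRender, String.join]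
  | cons m ms ih =>
    simp only [List.map_cons, String.join, List.foldl_cons, String.empty_append] at ih ⊢
    rw [pvFoldStr, ih]
    simp [pvRender]

theorem pvRender_append (xs ys : List String) :
    pvRender (xs ++ ys) = pvRender xs ++ pvRender ys := by
  induction xs with
  | nil => simp [pvRender]
  | cons m ms ih => simp only [List.cons_append, pvRender, ih, String.append_assoc]

theorem pvRender_ne_nil (m : String) (ms : List String) :
    pvRender (m :: ms) ≠ "" := by
  simp only [pvRender]
  intro h
  have := congrArg String.length h
  simp [String.length_append] at this

-- the whole equality
theorem pvMain (lines : List String) : out_of_order lines = out_of_order_alt lines := by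
  unfold out_of_order out_of_order_alt
  rw [pvCmdsEq]
  simp only [pvA1, pvA2, List.nil_append]
  have hkey := pvKey (pvExtract lines) [] 0
  simp only [List.reverse_nil, List.nil_append, Nat.cast_zero] at hkey
  simp only [show bInside ([] : List String) = false from rfl] at hkey
  have hb1 := pvB1 (pvExtract lines) (pvExtract lines) [] (by simp)
  simp only [List.length_nil] at hb1
  rw [hkey, hb1]
  cases hI : bInside (pvExtract lines).reverse with
  | true =>
    simp only [String.empty_append]
    have hne : pvRender (bMsgs [] (pvExtract lines) 0) ++ "ending in clause" ++ "\n" ≠ "" := by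
      intro h
      have := congrArg String.length h
      simp [String.length_append] at this
    simp only [hne, if_pos, ne_eq, not_false_eq_true]
    rw [pvJoin, pvRender_append]
    simp [pvRender, String.append_assoc]
  | false =>
    simp only [Bool.false_eq_true, if_false, String.empty_append]
    rw [pvJoin]
    cases hM : bMsgs [] (pvExtract lines) 0 with
    | nil => simp [pvRender]
    | cons m ms => simp [pvRender_ne_nil m ms]

-- ===== VERDICT (by name: the statement is the Claim_ definition above) =====
theorem out_of_order_spec : Claim_equal_out_of_order := by
  intro lines _ _
  unfold Spec_out_of_order
  exact pvMain lines
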